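-- pv_equiv track=rewrite | github.com/avstjohn/arxiv_scraper | get_data.py | categorize_tags
-- ===== SOURCE A (Python) =====
-- from collections import defaultdict
--
-- def categorize_tags(tags):
--         physics_cats = ["astro-ph", "cond-mat", "gr-qc", "hep-ex", "hep-lat",
--                         "hep-ph", "hep-th", "math-ph", "nlin", "nucl-ex",
--                         "nucl-th", "physics", "quant-ph"]
--
--         astroph_prefix = "astro-ph."
--         astroph_cats = ["GA", "CO", "EP", "HE", "IM", "SR"]
--
--         condmat_prefix = "cond-mat."
--         condmat_cats = ["dis-nn", "mtrl-sci", "mes-hall", "other",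
--                         "quant-gas", "soft", "stat-mech", "str-el",
--                         "supr-con"]
--
--         nlin_prefix = "nlin."
--         nlin_cats = ["AO", "CG", "CD", "SI", "PS"]
--
--         physics_prefix = "physics."
--         physics_subcats = ["acc-ph", "app-ph", "ao-ph", "atom-ph", "atm-clus",
--                         "bio-ph", "chem-ph", "class-ph", "comp-ph", "data-an",
--                         "flu-dyn", "gen-ph", "geo-ph", "hist-ph", "ins-det",
--                         "med-ph", "optics", "ed-ph", "soc-ph", "plasm-ph",
--                         "pop-ph", "space-ph"]
--
--         math_prefix = "math."
--         math_cats = ["AG", "AT", "AP", "CT", "CA", "CO", "AC", "CV",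
--                      "DG", "DS", "FA", "GM", "GN", "GT", "GR", "HO",
--                      "IT", "KT", "LO", "MP", "MG", "NT", "NA", "OA",
--                      "OC", "PR", "QA", "RT", "RA", "SP", "ST", "SG"]
--
--         stat_prefix = "stat."
--         stat_cats = ["AP", "CO", "ML", "ME", "OT", "TH"]
--
--         cat_counts = defaultdict(int)
--         for i in range(len(tags)):
--                 for j in range(len(tags[i])):
--                         if (tags[i][j] in physics_cats or
--                             tags[i][j] in [astroph_prefix + a for a in astroph_cats] or
--                             tags[i][j] in [condmat_prefix + a for a in condmat_cats] or
--                             tags[i][j] in [nlin_prefix + a for a in nlin_cats] or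
--                             tags[i][j] in [physics_prefix + a for a in physics_subcats] or
--                             tags[i][j] in [math_prefix + a for a in math_cats] or
--                             tags[i][j] in [stat_prefix + a for a in stat_cats]):
--                             cat_counts[tags[i][j]] += 1
--         return cat_counts
-- ===== SOURCE B (Python) =====
-- from collections import defaultdict
--
-- _PLAIN = set("astro-ph cond-mat gr-qc hep-ex hep-lat hep-ph hep-th math-ph "
--              "nlin nucl-ex nucl-th physics quant-ph".split())
--
-- _SUB = {
--     "astro-ph": set("GA CO EP HE IM SR".split()),
--     "cond-mat": set("dis-nn mtrl-sci mes-hall other quant-gas soft "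
--                     "stat-mech str-el supr-con".split()),
--     "nlin": set("AO CG CD SI PS".split()),
--     "physics": set("acc-ph app-ph ao-ph atom-ph atm-clus bio-ph chem-ph "
--                    "class-ph comp-ph data-an flu-dyn gen-ph geo-ph hist-ph "
--                    "ins-det med-ph optics ed-ph soc-ph plasm-ph pop-ph "
--                    "space-ph".split()),
--     "math": set("AG AT AP CT CA CO AC CV DG DS FA GM GN GT GR HO IT KT LO "
--                 "MP MG NT NA OA OC PR QA RT RA SP ST SG".split()),
--     "stat": set("AP CO ML ME OT TH".split()),
-- }
--
-- def _ok(tag):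
--     if "." in tag:
--         prefix, _, suffix = tag.partition(".")
--         return prefix in _SUB and suffix in _SUB[prefix]
--     return tag in _PLAIN
--
-- def categorize_tags(tags):
--     matched = [t for row in tags for t in row if _ok(t)]
--     counts = defaultdict(int)
--     for t in dict.fromkeys(matched):
--         counts[t] = matched.count(t)
--     return counts
-- ===== Notes on version B (the rewrite author's own statement) =====
-- stated objective: faster
-- what changed: B first collects the flat list of matching tags (testing each by splitting at its first '.' and looking the prefix up in a dict of suffix-sets, instead of A's membership test against seven expanded lists rebuilt per tag), then emits one (tag, count) pair per distinct matched tag in first-occurrence order via dict.fromkeys + list.count, instead of A's single incrementing loop.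
import Mathlib
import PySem

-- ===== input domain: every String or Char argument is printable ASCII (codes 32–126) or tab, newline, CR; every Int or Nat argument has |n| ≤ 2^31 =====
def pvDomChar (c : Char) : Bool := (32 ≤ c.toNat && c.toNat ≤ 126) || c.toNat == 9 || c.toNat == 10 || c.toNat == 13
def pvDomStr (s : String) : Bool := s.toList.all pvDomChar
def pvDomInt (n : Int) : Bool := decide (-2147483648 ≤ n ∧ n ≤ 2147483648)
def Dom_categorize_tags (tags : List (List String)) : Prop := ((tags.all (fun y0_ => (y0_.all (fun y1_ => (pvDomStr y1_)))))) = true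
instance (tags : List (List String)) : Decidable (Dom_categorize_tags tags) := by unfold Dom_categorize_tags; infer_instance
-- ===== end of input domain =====

-- B replaces A's per-tag test against seven expanded lists and A's counting loop by a two-stage pass:
-- collect the matching tags (testing each by splitting at its first '.' and a prefix->suffix-set lookup),
-- then emit one (tag, count) pair per distinct matched tag in first-occurrence order. Same result.
-- String operations of both ports are carried out on List Char (PySem's exact representation of Python str).

-- ===== PORT A =====
-- the constant string lists of A, as char lists (Python str ops on ASCII = List Char ops, exact)
def pvPhysicsCats : List (List Char) :=
  ["astro-ph".toList, "cond-mat".toList, "gr-qc".toList, "hep-ex".toList, "hep-lat".toList,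
   "hep-ph".toList, "hep-th".toList, "math-ph".toList, "nlin".toList, "nucl-ex".toList,
   "nucl-th".toList, "physics".toList, "quant-ph".toList]
def pvAstrophPrefix : List Char := "astro-ph.".toList
def pvAstrophCats : List (List Char) := ["GA".toList, "CO".toList, "EP".toList, "HE".toList, "IM".toList, "SR".toList]
def pvCondmatPrefix : List Char := "cond-mat.".toList
def pvCondmatCats : List (List Char) :=
  ["dis-nn".toList, "mtrl-sci".toList, "mes-hall".toList, "other".toList,
   "quant-gas".toList, "soft".toList, "stat-mech".toList, "str-el".toList, "supr-con".toList]
def pvNlinPrefix : List Char := "nlin.".toList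
def pvNlinCats : List (List Char) := ["AO".toList, "CG".toList, "CD".toList, "SI".toList, "PS".toList]
def pvPhysicsPrefix : List Char := "physics.".toList
def pvPhysicsSubcats : List (List Char) :=
  ["acc-ph".toList, "app-ph".toList, "ao-ph".toList, "atom-ph".toList, "atm-clus".toList,
   "bio-ph".toList, "chem-ph".toList, "class-ph".toList, "comp-ph".toList, "data-an".toList,
   "flu-dyn".toList, "gen-ph".toList, "geo-ph".toList, "hist-ph".toList, "ins-det".toList,
   "med-ph".toList, "optics".toList, "ed-ph".toList, "soc-ph".toList, "plasm-ph".toList,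
   "pop-ph".toList, "space-ph".toList]
def pvMathPrefix : List Char := "math.".toList
def pvMathCats : List (List Char) :=
  ["AG".toList, "AT".toList, "AP".toList, "CT".toList, "CA".toList, "CO".toList, "AC".toList, "CV".toList,
   "DG".toList, "DS".toList, "FA".toList, "GM".toList, "GN".toList, "GT".toList, "GR".toList, "HO".toList,
   "IT".toList, "KT".toList, "LO".toList, "MP".toList, "MG".toList, "NT".toList, "NA".toList, "OA".toList,
   "OC".toList, "PR".toList, "QA".toList, "RT".toList, "RA".toList, "SP".toList, "ST".toList, "SG".toList]
def pvStatPrefix : List Char := "stat.".toList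
def pvStatCats : List (List Char) := ["AP".toList, "CO".toList, "ML".toList, "ME".toList, "OT".toList, "TH".toList]

-- the big `if` condition of A (list-comprehension concatenations built exactly as in the source)
def pvCondA (t : List Char) : Bool :=
  pvPhysicsCats.contains t ||
  (pvAstrophCats.map (fun a => pvAstrophPrefix ++ a)).contains t ||
  (pvCondmatCats.map (fun a => pvCondmatPrefix ++ a)).contains t ||
  (pvNlinCats.map (fun a => pvNlinPrefix ++ a)).contains t ||
  (pvPhysicsSubcats.map (fun a => pvPhysicsPrefix ++ a)).contains t ||
  (pvMathCats.map (fun a => pvMathPrefix ++ a)).contains t ||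
  (pvStatCats.map (fun a => pvStatPrefix ++ a)).contains t

-- loop body of A: test the tag, count it (cat_counts[tag] += 1 on a defaultdict(int))
def pvStepA (d : PySem.Dict String Int) (tag : String) : PySem.Dict String Int :=
  if pvCondA tag.toList then d.modify tag 0 (· + 1) else d

def categorize_tags (tags : List (List String)) : List (String × Int) :=
  ((PySem.List.pyRange 0 (PySem.List.len tags) 1).foldl (fun d i =>
    (PySem.List.pyRange 0 (PySem.List.len (PySem.List.pyGetD tags i [])) 1).foldl (fun d j =>
      pvStepA d (PySem.List.pyGetD (PySem.List.pyGetD tags i []) j "")) d)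
    (PySem.Dict.empty : PySem.Dict String Int)).items

-- ===== PORT B =====
-- set("… … …".split()) : the whitespace-separated words of a literal, as a Python set
def pvWords (s : String) : PySem.Set (List Char) :=
  PySem.Set.ofList ((PySem.Str.split₀ s).map String.toList)

-- plain set of dotless category names
def pvPlain : PySem.Set (List Char) :=
  pvWords "astro-ph cond-mat gr-qc hep-ex hep-lat hep-ph hep-th math-ph nlin nucl-ex nucl-th physics quant-ph"

-- dict: dotted prefix (before the '.') ↦ set of allowed suffixes
def pvSub : PySem.Dict (List Char) (PySem.Set (List Char)) :=
  PySem.Dict.ofList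
    [("astro-ph".toList, pvWords "GA CO EP HE IM SR"),
     ("cond-mat".toList, pvWords "dis-nn mtrl-sci mes-hall other quant-gas soft stat-mech str-el supr-con"),
     ("nlin".toList, pvWords "AO CG CD SI PS"),
     ("physics".toList, pvWords "acc-ph app-ph ao-ph atom-ph atm-clus bio-ph chem-ph class-ph comp-ph data-an flu-dyn gen-ph geo-ph hist-ph ins-det med-ph optics ed-ph soc-ph plasm-ph pop-ph space-ph"),
     ("math".toList, pvWords "AG AT AP CT CA CO AC CV DG DS FA GM GN GT GR HO IT KT LO MP MG NT NA OA OC PR QA RT RA SP ST SG"),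
     ("stat".toList, pvWords "AP CO ML ME OT TH")]

-- B's per-tag test _ok: '"." in tag' then tag.partition(".") (= takeWhile/dropWhile at the FIRST '.'; exact)
def pvCondB (t : List Char) : Bool :=
  if t.contains '.' then
    match pvSub.get? (t.takeWhile (fun c => c != '.')) with
    | some s => PySem.Set.contains s ((t.dropWhile (fun c => c != '.')).drop 1)
    | none => false
  else PySem.Set.contains pvPlain t

-- two stages: the flat list of matching tags, then one (tag, count) pair per distinct matched tag
-- (dict.fromkeys = PySem.List.dedup, first occurrences in order; counts[t] = matched.count(t))
def categorize_tags_alt (tags : List (List String)) : List (String × Int) :=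
  let matched := tags.flatMap (fun row => row.filter (fun t => pvCondB t.toList))
  ((PySem.List.dedup matched).foldl
    (fun d t => d.insert t (matched.count t : Int)) (PySem.Dict.empty : PySem.Dict String Int)).items

-- ===== PRECONDITION & SPEC =====
def Spec_categorize_tags (tags : List (List String)) (out : List (String × Int)) : Prop := out = categorize_tags_alt tags
instance (tags : List (List String)) (out : List (String × Int)) : Decidable (Spec_categorize_tags tags out) := by unfold Spec_categorize_tags; infer_instance

-- ===== CLAIM (what is proved, stated in full; the proofs are below) =====
def Claim_equal_categorize_tags : Prop := ∀ (tags : List (List String)), Dom_categorize_tags tags → Spec_categorize_tags tags (categorize_tags tags)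

-- ===== LEMMAS AND PROOFS =====

-- all strings A's condition tests against, in A's order (the exact terms of pvCondA)
def pvAllCats : List (List Char) :=
  pvPhysicsCats ++
  pvAstrophCats.map (fun a => pvAstrophPrefix ++ a) ++
  pvCondmatCats.map (fun a => pvCondmatPrefix ++ a) ++
  pvNlinCats.map (fun a => pvNlinPrefix ++ a) ++
  pvPhysicsSubcats.map (fun a => pvPhysicsPrefix ++ a) ++
  pvMathCats.map (fun a => pvMathPrefix ++ a) ++
  pvStatCats.map (fun a => pvStatPrefix ++ a)

lemma pvCondA_eq_mem (t : List Char) : pvCondA t = pvAllCats.contains t := by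
  simp [pvCondA, pvAllCats, List.contains_eq_mem]
  ac_rfl

set_option maxRecDepth 8192 in
lemma pvAllB : ∀ x ∈ pvAllCats, pvCondB x = true := by decide

set_option maxRecDepth 8192 in
lemma pvAllPairs : ∀ kv ∈ pvSub.items, ∀ suf ∈ kv.2, pvCondA (kv.1 ++ '.' :: suf) = true := by decide

lemma pvCondB_of_condA (t : List Char) (h : pvCondA t = true) : pvCondB t = true := by
  rw [pvCondA_eq_mem, List.contains_eq_mem, decide_eq_true_iff] at h
  exact pvAllB t h

lemma pvDropWhile_dot (t : List Char) (h : '.' ∈ t) :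
    t.dropWhile (fun c => c != '.') = '.' :: (t.dropWhile (fun c => c != '.')).drop 1 := by
  have hne : t.dropWhile (fun c => c != '.') ≠ [] := by
    simp only [ne_eq, List.dropWhile_eq_nil_iff]
    push Not
    exact ⟨'.', h, by simp⟩
  have hh := List.head_dropWhile_not (fun c => c != '.') hne
  rcases hd : t.dropWhile (fun c => c != '.') with _ | ⟨c, rest⟩
  · exact absurd hd hne
  · simp [hd] at hh; simp [hh]

lemma pvCondA_of_condB (t : List Char) (h : pvCondB t = true) : pvCondA t = true := by
  unfold pvCondB at h
  by_cases hdot : t.contains '.'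
  · rw [if_pos hdot] at h
    rcases hg : pvSub.get? (t.takeWhile (fun c => c != '.')) with _ | s
    · rw [hg] at h; simp at h
    · rw [hg] at h
      have hmem := PySem.Dict.mem_items_of_get?_eq_some _ hg
      have hsuf : (t.dropWhile (fun c => c != '.')).drop 1 ∈ s := (PySem.Set.contains_iff s _).mp h
      have hsplit : t = t.takeWhile (fun c => c != '.') ++ '.' :: (t.dropWhile (fun c => c != '.')).drop 1 := by
        conv_lhs => rw [← List.takeWhile_append_dropWhile (p := fun c => c != '.') (l := t)]
        rw [← pvDropWhile_dot t (by simpa [List.contains_eq_mem] using hdot)]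
      rw [hsplit]
      exact pvAllPairs _ hmem _ hsuf
  · rw [if_neg hdot] at h
    have hmem : t ∈ pvPlain := (PySem.Set.contains_iff pvPlain t).mp h
    have hpp : (pvPlain : List (List Char)) = pvPhysicsCats := by decide
    rw [pvCondA_eq_mem, List.contains_eq_mem, decide_eq_true_iff]
    unfold pvAllCats
    simp only [List.mem_append]
    exact Or.inl (Or.inl (Or.inl (Or.inl (Or.inl (Or.inl (hpp ▸ hmem))))))

lemma pvCond_eq (t : List Char) : pvCondA t = pvCondB t := by
  cases hA : pvCondA t
  · cases hB : pvCondB t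
    · rfl
    · rw [pvCondA_of_condB t hB] at hA; exact hA.symm ▸ rfl
  · exact (pvCondB_of_condA t hA).symm

-- filtering then folding the counting step = folding the if-guarded step (A's loop body)
lemma pvFoldl_filter_modify (l : List String) (d : PySem.Dict String Int) :
    (l.filter (fun t => pvCondA t.toList)).foldl (fun d t => d.modify t 0 (· + 1)) d
      = l.foldl pvStepA d := by
  induction l generalizing d with
  | nil => rfl
  | cons x xs ih =>
    by_cases hx : pvCondA x.toList
    · simp [hx, pvStepA, ih]
    · simp [hx, pvStepA, ih]

-- flat-mapping a filter = filtering the flattened list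
lemma pvFlatMap_filter (p : String → Bool) (tags : List (List String)) :
    tags.flatMap (fun row => row.filter p) = tags.flatten.filter p := by
  induction tags with
  | nil => rfl
  | cons r rs ih => simp [List.filter_append, ih]

-- A's whole nested loop builds Counter(matched) where matched = the flat list of tags passing pvCondA
lemma pvA_eq_counter (tags : List (List String)) :
    ((PySem.List.pyRange 0 (PySem.List.len tags) 1).foldl (fun d i =>
        (PySem.List.pyRange 0 (PySem.List.len (PySem.List.pyGetD tags i [])) 1).foldl (fun d j =>
          pvStepA d (PySem.List.pyGetD (PySem.List.pyGetD tags i []) j "")) d)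
      (PySem.Dict.empty : PySem.Dict String Int))
    = PySem.Dict.counter (tags.flatMap (fun row => row.filter (fun t => pvCondA t.toList))) := by
  rw [PySem.List.foldl_pyRange_zero_pyGetD tags []
    (fun d row => (PySem.List.pyRange 0 (PySem.List.len row) 1).foldl
      (fun d j => pvStepA d (PySem.List.pyGetD row j "")) d)]
  rw [PySem.List.foldl_congr_mem tags _ (fun d row => row.foldl pvStepA d) _
    (fun d row _ => PySem.List.foldl_pyRange_zero_pyGetD row "" pvStepA d)]
  rw [pvFlatMap_filter, PySem.Dict.counter_eq_foldl, pvFoldl_filter_modify, List.foldl_flatten]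

-- ===== VERDICT (by name: the statement is the Claim_ definition above) =====
theorem categorize_tags_spec : Claim_equal_categorize_tags := by
  intro tags _
  unfold Spec_categorize_tags categorize_tags categorize_tags_alt
  rw [pvA_eq_counter]
  have hmeq : (fun t => pvCondA t.toList) = (fun t : String => pvCondB t.toList) :=
    funext fun t => pvCond_eq t.toList
  rw [hmeq]
  set m := tags.flatMap (fun row => row.filter (fun t => pvCondB t.toList)) with hm
  rw [PySem.Dict.items_counter]
  rw [PySem.Dict.items_foldl_insert_fresh (PySem.List.dedup m) (fun t => t)
        (fun t => (m.count t : Int)) PySem.Dict.empty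
        (fun a _ => PySem.Dict.contains_empty a)
        (by simp [PySem.List.nodup_dedup])]
  simp [PySem.List.dedup_eq_ofList, PySem.Dict.empty, PySem.Dict.items]
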